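-- pv_equiv track=rewrite | github.com/Brucejr09/Org-de-Datos-106828 | analisis_exploratorio/funciones.py | ids
-- ===== SOURCE A (Python) =====
-- def ids(lista_1, lista_2):
--     lista = []
--     for id in lista_2:
--         try:
--             lista_1.remove(id)
--             lista.append(True)
--         except ValueError:
--             lista.append(False)
--     return lista
-- ===== SOURCE B (Python) =====
-- def ids(lista_1, lista_2):
--     # rank-vs-count formulation: the j-th occurrence (0-based) of an id in
--     # lista_2 consumes a copy iff j < multiplicity of id in lista_1; nothing
--     # is removed or decremented.
--     total = {}
--     for x in lista_1:
--         total[x] = total.get(x, 0) + 1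
--     rank = {}
--     out = []
--     for id in lista_2:
--         k = rank.get(id, 0)
--         rank[id] = k + 1
--         out.append(k < total.get(id, 0))
--     return out
-- ===== Notes on version B (the rewrite author's own statement) =====
-- stated objective: faster
-- what changed: Instead of consuming occurrences (A's remove / a decremented counter), B never removes anything: it compares each id's 0-based occurrence rank within lista_2 against the total multiplicity of that id in lista_1 (rank < count), using two read-mostly dictionaries built in one pass each.
import Mathlib
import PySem

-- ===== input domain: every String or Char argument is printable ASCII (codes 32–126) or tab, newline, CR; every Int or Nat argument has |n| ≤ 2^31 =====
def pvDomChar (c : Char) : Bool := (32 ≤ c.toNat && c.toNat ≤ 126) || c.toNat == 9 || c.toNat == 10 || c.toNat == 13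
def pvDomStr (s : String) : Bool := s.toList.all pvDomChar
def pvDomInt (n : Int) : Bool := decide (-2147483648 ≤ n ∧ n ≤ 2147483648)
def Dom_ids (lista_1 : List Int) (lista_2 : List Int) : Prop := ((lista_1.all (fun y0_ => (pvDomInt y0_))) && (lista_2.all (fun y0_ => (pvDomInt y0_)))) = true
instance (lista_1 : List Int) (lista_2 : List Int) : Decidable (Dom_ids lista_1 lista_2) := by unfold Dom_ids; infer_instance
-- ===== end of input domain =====

-- B replaces A's consuming remove-scan by a non-consuming rank-vs-count comparison (occurrence rank
-- in lista_2 versus total multiplicity in lista_1), O(n+m) vs O(n*m); equivalence is about the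
-- RETURN value only: Python A mutates lista_1 in place, B does not.

-- ===== PORT A =====
-- the for-loop over lista_2: state = (current lista_1, output list so far)
def idsLoop (l1 : List Int) (l2 : List Int) (acc : List Bool) : List Bool :=
  match l2 with
  | [] => acc
  | id :: rest =>
    match PySem.List.remove? l1 id with
    | some l1' => idsLoop l1' rest (acc ++ [true])
    | none => idsLoop l1 rest (acc ++ [false])

def ids (lista_1 : List Int) (lista_2 : List Int) : List Bool :=
  idsLoop lista_1 lista_2 []

-- ===== PORT B =====
def ids_alt (lista_1 : List Int) (lista_2 : List Int) : List Bool :=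
  let total := lista_1.foldl (fun d x => d.insert x (d.getD x 0 + 1)) (PySem.Dict.empty : PySem.Dict Int Int)
  (lista_2.foldl
    (fun (s : PySem.Dict Int Int × List Bool) id =>
      let k := s.1.getD id 0
      (s.1.insert id (k + 1), s.2 ++ [decide (k < total.getD id 0)]))
    ((PySem.Dict.empty : PySem.Dict Int Int), [])).2

-- ===== PRECONDITION & SPEC =====
def Spec_ids (lista_1 : List Int) (lista_2 : List Int) (out : List Bool) : Prop := out = ids_alt lista_1 lista_2
instance (lista_1 : List Int) (lista_2 : List Int) (out : List Bool) : Decidable (Spec_ids lista_1 lista_2 out) := by unfold Spec_ids; infer_instance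

-- ===== CLAIM (what is proved, stated in full; the proofs are below) =====
def Claim_equal_ids : Prop := ∀ (lista_1 : List Int) (lista_2 : List Int), Dom_ids lista_1 lista_2 → Spec_ids lista_1 lista_2 (ids lista_1 lista_2)

-- ===== LEMMAS AND PROOFS =====

-- loop invariant: the count of each id left in A's shrinking list equals
-- max (total multiplicity - occurrences of id already seen) 0
theorem idsLoop_eq_foldl (total : PySem.Dict Int Int) (l2 : List Int) :
    ∀ (l1 : List Int) (seen : PySem.Dict Int Int) (acc : List Bool),
    (∀ k : Int, (l1.count k : Int) = max (total.getD k 0 - seen.getD k 0) 0) →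
    idsLoop l1 l2 acc =
      (l2.foldl
        (fun (s : PySem.Dict Int Int × List Bool) id =>
          let k := s.1.getD id 0
          (s.1.insert id (k + 1), s.2 ++ [decide (k < total.getD id 0)]))
        (seen, acc)).2 := by
  induction l2 with
  | nil => intro l1 seen acc _; simp [idsLoop]
  | cons id rest ih =>
    intro l1 seen acc hinv
    by_cases hmem : id ∈ l1
    · have hcnt : 1 ≤ l1.count id := List.count_pos_iff.mpr hmem
      have hlt : seen.getD id 0 < total.getD id 0 := by
        have := hinv id; omega
      have hrem := PySem.List.remove?_eq_some_erase l1 id hmem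
      simp only [idsLoop, hrem, List.foldl_cons]
      rw [ih (l1.erase id) (seen.insert id (seen.getD id 0 + 1)) (acc ++ [true]) ?_]
      · simp [hlt]
      · intro k
        rw [PySem.Dict.getD_insert]
        by_cases hk : k = id
        · subst hk
          have h1 := hinv k
          rw [List.count_erase_self, if_pos rfl]
          omega
        · rw [if_neg hk, List.count_erase_of_ne hk, hinv k]
    · have hcnt : l1.count id = 0 := List.count_eq_zero_of_not_mem hmem
      have hge : ¬ seen.getD id 0 < total.getD id 0 := by
        have := hinv id; omega
      have hrem : PySem.List.remove? l1 id = none :=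
        (PySem.List.remove?_eq_none_iff l1 id).mpr hmem
      simp only [idsLoop, hrem, List.foldl_cons]
      rw [ih l1 (seen.insert id (seen.getD id 0 + 1)) (acc ++ [false]) ?_]
      · simp [hge]
      · intro k
        rw [PySem.Dict.getD_insert]
        by_cases hk : k = id
        · subst hk
          have h1 := hinv k
          rw [if_pos rfl]; omega
        · rw [if_neg hk]; exact hinv k

-- ===== VERDICT (by name: the statement is the Claim_ definition above) =====
theorem ids_spec : Claim_equal_ids := by
  intro l1 l2 _
  unfold Spec_ids ids ids_alt
  exact idsLoop_eq_foldl _ l2 l1 _ [] (fun k => by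
    rw [PySem.Dict.getD_foldl_insert_add_one]
    simp [PySem.Dict.empty])
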